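-- pv_equiv track=rewrite | github.com/dianamenesesg/HackerRank | Interview_Preparation_Kit/problem_solving.py | gradingStudents
-- ===== SOURCE A (Python) =====
-- def gradingStudents(grades_list):
--     final_list = []
--     for grade in grades_list:
--         if grade < 38:
--             final_list.append(grade)
--
--         else:
--             grade_old = grade
--             while  not grade%5==0:
--                 grade += 1
--             if grade - grade_old < 3:
--                 final_list.append(grade)
--             else:
--                 final_list.append(grade_old)
--
--     return final_list
-- ===== SOURCE B (Python) =====
-- def gradingStudents(grades_list):
--     def round_one(g):
--         if g < 38:
--             return g
--         next5 = ((g + 4) // 5) * 5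
--         return next5 if next5 - g < 3 else g
--     return [round_one(g) for g in grades_list]
-- ===== Notes on version B (the rewrite author's own statement) =====
-- stated objective: simpler
-- what changed: Replaced the inner while-loop search for the next multiple of 5 with the closed-form ((g+4)//5)*5 inside a per-element map.
import Mathlib
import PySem

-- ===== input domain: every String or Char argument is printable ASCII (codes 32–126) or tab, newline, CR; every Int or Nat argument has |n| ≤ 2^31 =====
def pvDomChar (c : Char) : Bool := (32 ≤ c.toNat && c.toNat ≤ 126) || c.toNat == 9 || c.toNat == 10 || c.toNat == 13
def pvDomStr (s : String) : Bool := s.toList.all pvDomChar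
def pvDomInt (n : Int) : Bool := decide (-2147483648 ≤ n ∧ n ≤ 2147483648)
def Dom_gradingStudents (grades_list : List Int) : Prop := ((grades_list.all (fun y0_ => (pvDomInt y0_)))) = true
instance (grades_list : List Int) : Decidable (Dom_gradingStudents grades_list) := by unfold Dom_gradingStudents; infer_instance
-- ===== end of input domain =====

-- ===== PORT A =====
-- while loop: grade += 1 until grade % 5 == 0; fuel 5 suffices since mod 5 ∈ [0,5)
def pvWhileA (fuel : Nat) (grade : Int) : Int :=
  match fuel with
  | 0 => grade
  | n+1 => if PySem.Int.mod grade 5 == 0 then grade else pvWhileA n (grade + 1)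

def gradingStudents (grades_list : List Int) : List Int :=
  grades_list.foldl (fun final_list grade =>
    if grade < 38 then
      final_list ++ [grade]
    else
      let grade_old := grade
      let grade := pvWhileA 5 grade
      if grade - grade_old < 3 then final_list ++ [grade]
      else final_list ++ [grade_old]) []

-- ===== PORT B =====
-- B (simpler): per-element map computing the next multiple of 5 in closed form ((g+4)//5)*5, no inner loop.
def pvRoundOne (g : Int) : Int :=
  if g < 38 then g
  else
    let next5 := PySem.Int.floordiv (g + 4) 5 * 5
    if next5 - g < 3 then next5 else g

def gradingStudents_alt (grades_list : List Int) : List Int :=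
  grades_list.map pvRoundOne

-- ===== PRECONDITION & SPEC =====
def Spec_gradingStudents (grades_list : List Int) (out : List Int) : Prop := out = gradingStudents_alt grades_list
instance (grades_list : List Int) (out : List Int) : Decidable (Spec_gradingStudents grades_list out) := by unfold Spec_gradingStudents; infer_instance

-- ===== CLAIM (what is proved, stated in full; the proofs are below) =====
def Claim_equal_gradingStudents : Prop := ∀ (grades_list : List Int), Dom_gradingStudents grades_list → Spec_gradingStudents grades_list (gradingStudents grades_list)

-- ===== LEMMAS AND PROOFS =====

theorem pvElemEq (g : Int) :
    (if g < 38 then g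
     else if pvWhileA 5 g - g < 3 then pvWhileA 5 g else g) = pvRoundOne g := by
  unfold pvRoundOne
  by_cases h : g < 38
  · simp [h]
  · have hw : pvWhileA 5 g = PySem.Int.floordiv (g + 4) 5 * 5 := by
      have hm : ∀ x : Int, PySem.Int.mod x 5 = x % 5 :=
        fun x => PySem.Int.mod_eq_emod_of_pos (by norm_num)
      have hd : PySem.Int.floordiv (g+4) 5 = (g+4) / 5 :=
        PySem.Int.floordiv_eq_ediv_of_pos (by norm_num)
      have hb := Int.emod_nonneg g (by norm_num : (5:Int) ≠ 0)
      have hub := Int.emod_lt_of_pos g (by norm_num : (0:Int) < 5)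
      simp only [pvWhileA, hm, hd, beq_iff_eq]
      split_ifs <;> omega
    simp only [if_neg h, hw]

theorem pvFoldEq (xs : List Int) : gradingStudents xs = gradingStudents_alt xs := by
  unfold gradingStudents gradingStudents_alt
  induction xs using List.reverseRecOn with
  | nil => rfl
  | append_singleton ys g ih =>
    rw [List.foldl_append, List.map_append, ← ih]
    have h := pvElemEq g
    simp only [List.foldl_cons, List.foldl_nil, List.map_cons, List.map_nil]
    split_ifs with h1 h2
    · rw [if_pos h1] at h; rw [← h]
    · rw [if_neg h1, if_pos h2] at h; rw [← h]
    · rw [if_neg h1, if_neg h2] at h; rw [← h]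

-- ===== VERDICT (by name: the statement is the Claim_ definition above) =====
theorem gradingStudents_spec : Claim_equal_gradingStudents := by
  intro grades_list _
  exact pvFoldEq grades_list
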